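-- pv_equiv track=rewrite | github.com/alamius/aplay_music.py | playing.aplay.py | modify_for_terminal
-- ===== SOURCE A (Python) =====
-- def modify_for_terminal(name, maske="[\"]\\|", filter=""):
--     result = ""
--     for c in name:
--         if(c in filter):
--             continue
--         if(c in maske):
--             result += "\\"
--         result += c
--     return result
-- ===== SOURCE B (Python) =====
-- def _span_plain(s, maske, filter):
--     # longest prefix of s with no maske/filter char, plus the remainder
--     for i, c in enumerate(s):
--         if c in maske or c in filter:
--             return s[:i], s[i:]
--     return s, ""
--
-- def modify_for_terminal(name, maske="[\"]\\|", filter=""):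
--     # run-based scanner: copy maximal plain runs as whole slices,
--     # then handle the single special character that ended the run
--     parts = []
--     rest = name
--     while rest:
--         plain, rest = _span_plain(rest, maske, filter)
--         parts.append(plain)
--         if rest:
--             c, rest = rest[0], rest[1:]
--             if c not in filter:
--                 parts.append("\\" + c)
--     return "".join(parts)
-- ===== Notes on version B (the rewrite author's own statement) =====
-- stated objective: alternative
-- what changed: B replaces A's per-character accumulator loop with a run-based scanner: it repeatedly splits the remaining string at the next maske/filter character (span), appends the whole plain run as one slice, then emits the escaped or deleted special character, joining the collected parts at the end.
import Mathlib
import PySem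

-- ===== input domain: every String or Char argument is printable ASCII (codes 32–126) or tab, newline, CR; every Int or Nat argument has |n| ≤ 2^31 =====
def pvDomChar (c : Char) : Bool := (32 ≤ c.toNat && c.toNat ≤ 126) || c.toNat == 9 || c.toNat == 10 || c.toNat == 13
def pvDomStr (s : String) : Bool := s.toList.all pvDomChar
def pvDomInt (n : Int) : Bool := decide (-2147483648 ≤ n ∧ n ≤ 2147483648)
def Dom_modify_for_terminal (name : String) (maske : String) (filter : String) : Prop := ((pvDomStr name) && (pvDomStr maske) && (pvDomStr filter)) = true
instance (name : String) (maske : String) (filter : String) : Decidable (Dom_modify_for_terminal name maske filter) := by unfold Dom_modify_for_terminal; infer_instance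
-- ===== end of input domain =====

-- B scans the string run by run (split at the next maske/filter char, copy the plain run whole,
-- handle the one special char), instead of A's per-character loop; return values proved equal.

-- ===== PORT A =====
-- result as a list of chars; `c in filter` on a single char = char membership (exact here)
def modify_for_terminal (name : String) (maske : String) (filter : String) : String :=
  String.mk (name.toList.foldl (fun result c =>
    if filter.toList.contains c then result
    else
      let result := if maske.toList.contains c then result ++ ['\\'] else result
      result ++ [c]) [])

-- ===== PORT B =====
-- _span_plain: longest prefix with no maske/filter char, plus the remainder (s[:i], s[i:])
def pvSpanPlain (maske filter : List Char) : List Char → List Char × List Char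
  | [] => ([], [])
  | c :: s =>
    if maske.contains c || filter.contains c then ([], c :: s)
    else
      let p := pvSpanPlain maske filter s
      (c :: p.1, p.2)

-- the while-loop over `rest`; fuel only makes the recursion structurally total
-- (fuel = rest.length + 1 suffices: each iteration consumes at least one char)
def pvLoop (maske filter : List Char) : Nat → List Char → List Char
  | 0, _ => []
  | Nat.succ n, rest =>
    match rest with
    | [] => []
    | _ :: _ =>
      let pr := pvSpanPlain maske filter rest
      match pr.2 with
      | [] => pr.1
      | c :: rest' =>
        pr.1 ++ (if filter.contains c then [] else ['\\', c]) ++ pvLoop maske filter n rest'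

def modify_for_terminal_alt (name : String) (maske : String) (filter : String) : String :=
  String.mk (pvLoop maske.toList filter.toList (name.toList.length + 1) name.toList)

-- ===== PRECONDITION & SPEC =====
def Spec_modify_for_terminal (name : String) (maske : String) (filter : String) (out : String) : Prop := out = modify_for_terminal_alt name maske filter
instance (name : String) (maske : String) (filter : String) (out : String) : Decidable (Spec_modify_for_terminal name maske filter out) := by unfold Spec_modify_for_terminal; infer_instance

-- ===== CLAIM =====
def Claim_equal_modify_for_terminal : Prop := ∀ (name : String) (maske : String) (filter : String), Dom_modify_for_terminal name maske filter → Spec_modify_for_terminal name maske filter (modify_for_terminal name maske filter)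

-- ===== LEMMAS AND PROOFS =====

-- the per-character replacement both programs realise
def pvPiece (maske filter : List Char) (c : Char) : List Char :=
  if filter.contains c then []
  else if maske.contains c then ['\\', c] else [c]

-- A's loop accumulates exactly the concatenation of the pieces
theorem foldl_piece (maske filter : List Char) (l acc : List Char) :
    (l.foldl (fun result c =>
      if filter.contains c then result
      else
        let result := if maske.contains c then result ++ ['\\'] else result
        result ++ [c]) acc)
      = acc ++ (l.map (pvPiece maske filter)).flatten := by
  induction l generalizing acc with
  | nil => simp
  | cons x l ih =>
    simp only [List.foldl_cons, List.map_cons, List.flatten_cons, ih]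
    unfold pvPiece
    cases hf : filter.contains x <;> cases hm : maske.contains x <;>
      simp [List.append_assoc]

-- span returns a decomposition of its input into a plain run and a remainder
theorem pvSpanPlain_spec (m f : List Char) (l : List Char) :
    l = (pvSpanPlain m f l).1 ++ (pvSpanPlain m f l).2
    ∧ (∀ c ∈ (pvSpanPlain m f l).1, m.contains c = false ∧ f.contains c = false)
    ∧ (∀ c r', (pvSpanPlain m f l).2 = c :: r' → (m.contains c || f.contains c) = true) := by
  induction l with
  | nil => simp [pvSpanPlain]
  | cons x s ih =>
    simp only [pvSpanPlain]
    cases h : (m.contains x || f.contains x) with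
    | true =>
      simp only [if_true]
      refine ⟨by simp, by simp, ?_⟩
      intro c r' he
      rw [List.cons.injEq] at he
      obtain ⟨rfl, -⟩ := he
      exact h
    | false =>
      simp only [Bool.false_eq_true, if_false]
      obtain ⟨h1, h2, h3⟩ := ih
      refine ⟨by simpa using h1, ?_, h3⟩
      intro c hc
      rcases List.mem_cons.mp hc with rfl | hc
      · simp only [Bool.or_eq_false_iff] at *
        exact ⟨by simpa using h.1, by simpa using h.2⟩
      · exact h2 c hc

-- a plain run maps to itself
theorem flatten_map_plain (m f : List Char) (p : List Char)
    (h : ∀ c ∈ p, m.contains c = false ∧ f.contains c = false) :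
    (p.map (pvPiece m f)).flatten = p := by
  induction p with
  | nil => simp
  | cons x s ih =>
    obtain ⟨hm, hf⟩ := h x (List.mem_cons_self ..)
    rw [List.map_cons, List.flatten_cons, ih (fun c hc => h c (List.mem_cons_of_mem _ hc))]
    unfold pvPiece
    rw [hf, hm]
    simp

-- B's scanner produces the same concatenation of pieces
theorem pvLoop_eq (m f : List Char) (n : Nat) (l : List Char) (h : l.length < n) :
    pvLoop m f n l = (l.map (pvPiece m f)).flatten := by
  induction n generalizing l with
  | zero => omega
  | succ n ih =>
    match l with
    | [] => simp [pvLoop]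
    | c0 :: l0 =>
      obtain ⟨h1, h2, h3⟩ := pvSpanPlain_spec m f (c0 :: l0)
      simp only [pvLoop]
      rcases hr : (pvSpanPlain m f (c0 :: l0)).2 with _ | ⟨c, rest'⟩
      · dsimp only
        set p := (pvSpanPlain m f (c0 :: l0)).1 with hp
        rw [hr, List.append_nil] at h1
        rw [h1]
        exact (flatten_map_plain m f _ h2).symm
      · dsimp only
        set p := (pvSpanPlain m f (c0 :: l0)).1 with hp
        rw [hr] at h1
        have hlen : (c0 :: l0).length = p.length + (c :: rest').length := by
          rw [h1, List.length_append]
        have hrest : rest'.length < n := by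
          simp only [List.length_cons] at hlen h; omega
        rw [h1, List.map_append, List.flatten_append, flatten_map_plain m f _ h2,
          List.map_cons, List.flatten_cons, ih rest' hrest]
        have hc := h3 c rest' hr
        have hpc : pvPiece m f c = if f.contains c then [] else ['\\', c] := by
          unfold pvPiece
          cases hf : f.contains c
          · cases hm : m.contains c
            · rw [hf, hm] at hc; simp at hc
            · simp
          · simp
        rw [hpc]
        simp [List.append_assoc]

-- ===== VERDICT =====
theorem modify_for_terminal_spec : Claim_equal_modify_for_terminal := by
  intro name maske filter _
  unfold Spec_modify_for_terminal modify_for_terminal modify_for_terminal_alt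
  rw [foldl_piece, pvLoop_eq _ _ _ _ (Nat.lt_succ_self _), List.nil_append]
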